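-- pv_equiv track=rewrite | github.com/JShea232/turn-taking | preprocessor.py | remove_tokens
-- ===== SOURCE A (Python) =====
-- def remove_tokens(sentence: str, invalid_starts: list, invalid_ends: list) -> str:
-- 	"""Removes certain tokens from a string.
--
-- 	Args:
-- 		sentence: The string to process.
-- 		invalid_starts: A list of starting strings for tokens to remove.
-- 		invalid_ends: A list of ending strings for tokens to remove.
--
-- 	Returns:
-- 		A string without the specified tokens.
-- 	"""
-- 	tokens = sentence.split()
-- 	for invalid_start in invalid_starts:
-- 		tokens = [token for token in tokens if not token.startswith(invalid_start)]
-- 	for invalid_end in invalid_ends: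
-- 		tokens = [token for token in tokens if not token.endswith(invalid_end)]
-- 	sentence = ' '.join(tokens)
-- 	return sentence
-- ===== SOURCE B (Python) =====
-- def remove_tokens(sentence: str, invalid_starts: list, invalid_ends: list) -> str:
-- 	"""Single pass: keep exactly the tokens that match no invalid start and
-- 	no invalid end, instead of re-filtering the token list once per pattern."""
-- 	def keep(token):
-- 		for invalid_start in invalid_starts:
-- 			if token.startswith(invalid_start):
-- 				return False
-- 		for invalid_end in invalid_ends:
-- 			if token.endswith(invalid_end):
-- 				return False
-- 		return True
-- 	return ' '.join(token for token in sentence.split() if keep(token))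
-- ===== Notes on version B (the rewrite author's own statement) =====
-- stated objective: simpler
-- what changed: B filters the token list once with a keep(token) predicate that checks all prefixes/suffixes per token, instead of A's rebuilding of the whole token list in a separate filtering pass for each prefix and each suffix.
import Mathlib
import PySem

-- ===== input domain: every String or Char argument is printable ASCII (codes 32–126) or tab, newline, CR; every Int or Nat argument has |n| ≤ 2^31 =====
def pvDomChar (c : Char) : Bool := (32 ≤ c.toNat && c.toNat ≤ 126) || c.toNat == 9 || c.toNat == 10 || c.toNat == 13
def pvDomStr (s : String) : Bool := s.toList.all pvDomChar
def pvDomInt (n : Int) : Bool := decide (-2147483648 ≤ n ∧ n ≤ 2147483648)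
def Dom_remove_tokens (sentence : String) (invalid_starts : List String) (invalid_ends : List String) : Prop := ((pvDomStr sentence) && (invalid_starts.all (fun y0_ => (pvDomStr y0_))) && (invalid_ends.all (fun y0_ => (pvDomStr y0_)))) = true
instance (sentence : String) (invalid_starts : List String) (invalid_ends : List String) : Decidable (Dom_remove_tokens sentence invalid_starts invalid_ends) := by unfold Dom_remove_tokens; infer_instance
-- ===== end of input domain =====

-- ===== PORT A =====
-- One honest line: B replaces A's per-pattern re-filtering passes by a single
-- filter with a per-token keep predicate (objective: simpler).
def remove_tokens (sentence : String) (invalid_starts : List String) (invalid_ends : List String) : String :=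
  let tokens := PySem.Str.split₀ sentence
  let tokens := invalid_starts.foldl
    (fun ts invalid_start => ts.filter (fun token => !PySem.Str.startswith token invalid_start)) tokens
  let tokens := invalid_ends.foldl
    (fun ts invalid_end => ts.filter (fun token => !PySem.Str.endswith token invalid_end)) tokens
  PySem.Str.join " " tokens

-- ===== PORT B =====
-- keep: B's helper — false on the first matching prefix, then the first matching suffix
def pvKeep (invalid_starts : List String) (invalid_ends : List String) (token : String) : Bool :=
  if invalid_starts.any (fun invalid_start => PySem.Str.startswith token invalid_start) then false
  else if invalid_ends.any (fun invalid_end => PySem.Str.endswith token invalid_end) then false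
  else true

def remove_tokens_alt (sentence : String) (invalid_starts : List String) (invalid_ends : List String) : String :=
  PySem.Str.join " " ((PySem.Str.split₀ sentence).filter (pvKeep invalid_starts invalid_ends))

-- ===== PRECONDITION & SPEC =====
def Spec_remove_tokens (sentence : String) (invalid_starts : List String) (invalid_ends : List String) (out : String) : Prop := out = remove_tokens_alt sentence invalid_starts invalid_ends
instance (sentence : String) (invalid_starts : List String) (invalid_ends : List String) (out : String) : Decidable (Spec_remove_tokens sentence invalid_starts invalid_ends out) := by unfold Spec_remove_tokens; infer_instance

-- ===== CLAIM (what is proved, stated in full; the proofs are below) =====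
def Claim_equal_remove_tokens : Prop := ∀ (sentence : String) (invalid_starts : List String) (invalid_ends : List String), Dom_remove_tokens sentence invalid_starts invalid_ends → Spec_remove_tokens sentence invalid_starts invalid_ends (remove_tokens sentence invalid_starts invalid_ends)

-- ===== LEMMAS AND PROOFS =====

-- ===== VERDICT (by name: the statement is the Claim_ definition above) =====
-- a foldl of filters over a pattern list is one filter by the conjunction over the list
theorem foldl_filter_eq_filter_all {α β : Type} (g : β → α → Bool) :
    ∀ (ps : List α) (ts : List β),
      ps.foldl (fun acc p => acc.filter (fun t => !g t p)) ts
        = ts.filter (fun t => ps.all (fun p => !g t p)) := by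
  intro ps
  induction ps with
  | nil => intro ts; simp
  | cons p rest ih =>
    intro ts
    simp only [List.foldl_cons, ih, List.filter_filter, List.all_cons]
    apply List.filter_congr
    intro t _
    cases g t p <;> simp

theorem remove_tokens_spec : Claim_equal_remove_tokens := by
  intro sentence invalid_starts invalid_ends _
  unfold Spec_remove_tokens remove_tokens remove_tokens_alt
  simp only [foldl_filter_eq_filter_all, List.filter_filter]
  congr 1
  apply List.filter_congr
  intro t _
  unfold pvKeep
  cases hs : invalid_starts.any (fun p => PySem.Str.startswith t p) <;>
    cases he : invalid_ends.any (fun p => PySem.Str.endswith t p) <;>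
      simp_all [List.all_eq_not_any_not]
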